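-- pv_equiv track=rewrite | github.com/schleierlab/suprtools | sslab_txz/fp_theory/coupling.py | inset_level_maker
-- ===== SOURCE A (Python) =====
-- import itertools
--
-- def inset_level_maker(locs, gap):
--     '''
--     Given sequence `locs` sorted in ascending order, return the unique
--     sequence `levels` of non-negative integers of equal length such that
--     levels[i] is the smallest non-negative integer that does not occur
--     among all levels[j] for indices j < i with locs[i] - locs[j] < gap.
--
--     Parameters
--     ----------
--     locs : Sequence[float]
--         Sequence of inset locations sorted in ascending order
--     gap : float
--
--     Returns
--     -------
--     levels : Sequence[int]
--     '''
--     levels = []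
--     j = 0
--     for i in range(len(locs)):
--         while locs[i] - locs[j] > gap:
--             j += 1
--
--         for k in itertools.count():
--             if k not in set(levels[j:i]):
--                 levels.append(k)
--                 break
--     return levels
-- ===== SOURCE B (Python) =====
-- def inset_level_maker(locs, gap):
--     n = len(locs)
--     # pass 1: window start index for each i (same shared advancing pointer)
--     starts = []
--     j = 0
--     for i in range(n):
--         while locs[i] - locs[j] > gap:
--             j += 1
--         starts.append(j)
--     # pass 2: mex of each window by sorting it and scanning for the first gap
--     levels = []
--     for i in range(n):
--         k = 0
--         for v in sorted(levels[starts[i]:i]):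
--             if v == k:
--                 k += 1
--         levels.append(k)
--     return levels
-- ===== Notes on version B (the rewrite author's own statement) =====
-- stated objective: faster
-- what changed: A interleaves everything in one loop and, per index, tries levels k=0,1,2,... rebuilding set(levels[j:i]) for each tried k; B is two staged passes: first it precomputes all window starts with the advancing pointer, then it computes each mex by sorting the window once and scanning the sorted values for the first gap.
import Mathlib
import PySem

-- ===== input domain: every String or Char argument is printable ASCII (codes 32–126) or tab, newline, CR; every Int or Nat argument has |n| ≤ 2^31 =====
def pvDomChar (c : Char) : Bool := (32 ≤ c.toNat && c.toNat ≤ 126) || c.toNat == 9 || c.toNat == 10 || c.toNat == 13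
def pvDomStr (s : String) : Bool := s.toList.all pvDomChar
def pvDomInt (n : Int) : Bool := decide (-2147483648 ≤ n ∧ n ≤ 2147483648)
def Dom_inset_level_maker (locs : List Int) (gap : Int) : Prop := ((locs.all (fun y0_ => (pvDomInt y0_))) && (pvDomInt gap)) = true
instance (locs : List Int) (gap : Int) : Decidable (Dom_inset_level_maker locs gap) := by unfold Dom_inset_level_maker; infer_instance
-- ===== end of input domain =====

-- B replaces A's single interleaved loop (which tries k = 0,1,2,… rebuilding set(levels[j:i])
-- for every tried k) by two staged passes: precompute all window starts, then obtain each
-- window's mex by sorting the window once and scanning for the first gap.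

-- ===== PORT A =====
-- while locs[i] - locs[j] > gap: j += 1   (out-of-range locs[j] is Python's IndexError, excluded by Pre_; the guard only makes the recursion total)
def pvAdvA (locs : List Int) (gap xi : Int) (j : Nat) : Nat :=
  if h : j < locs.length then
    if gap < xi - locs[j] then pvAdvA locs gap xi (j + 1) else j
  else j
termination_by locs.length - j

-- for k in itertools.count(): if k not in set(levels[j:i]): break   (fuel |s|+1 bounds the search; Python's loop always stops within it)
def pvMexA (s : List Int) (k fuel : Nat) : Int :=
  match fuel with
  | 0 => (k : Int)
  | f + 1 => if (PySem.Set.ofList s).contains (k : Int) then pvMexA s (k + 1) f else (k : Int)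

def inset_level_maker (locs : List Int) (gap : Int) : List Int :=
  ((List.range locs.length).foldl (fun (st : List Int × Nat) i =>
    let j := pvAdvA locs gap (locs.getD i 0) st.2   -- i < len locs, so getD is exactly locs[i]
    let s := PySem.List.slice st.1 (some (j : Int)) (some (i : Int))
    (st.1 ++ [pvMexA s 0 (s.length + 1)], j)) ([], 0)).1

-- ===== PORT B =====
-- pass 1: while locs[i] - locs[j] > gap: j += 1   (same totalizing guard as in A's port)
def pvAdvB (locs : List Int) (gap xi : Int) (j : Nat) : Nat :=
  if h : j < locs.length then
    if gap < xi - locs[j] then pvAdvB locs gap xi (j + 1) else j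
  else j
termination_by locs.length - j

-- k = 0; for v in sorted(window): if v == k: k += 1
def pvSortedScan (t : List Int) (k : Nat) : Nat :=
  match t with
  | [] => k
  | v :: rest => if v = (k : Int) then pvSortedScan rest (k + 1) else pvSortedScan rest k

def inset_level_maker_alt (locs : List Int) (gap : Int) : List Int :=
  let n := locs.length
  let starts := ((List.range n).foldl (fun (st : List Nat × Nat) i =>
    let j := pvAdvB locs gap (locs.getD i 0) st.2   -- i < n, so getD is exactly locs[i]
    (st.1 ++ [j], j)) ([], 0)).1
  (List.range n).foldl (fun (levels : List Int) i =>
    let window := PySem.List.slice levels (some ((starts.getD i 0 : Nat) : Int)) (some (i : Int))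
    -- i < len starts in pass 2, so getD is exactly starts[i]
    levels ++ [((pvSortedScan (PySem.List.sorted window (fun x => x) false) 0 : Nat) : Int)]) []

-- ===== PRECONDITION & SPEC =====
-- With gap < 0 and locs nonempty, A's window pointer always runs past the end of locs and raises IndexError; Pre_ excludes exactly those inputs.
def Pre_inset_level_maker (locs : List Int) (gap : Int) : Prop := 0 ≤ gap ∨ locs = []
instance (locs : List Int) (gap : Int) : Decidable (Pre_inset_level_maker locs gap) := by unfold Pre_inset_level_maker; infer_instance
def pvWitness_inset_level_maker : List Int × Int := ([0, 1, 2, 5, 6], 2)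

def Spec_inset_level_maker (locs : List Int) (gap : Int) (out : List Int) : Prop := out = inset_level_maker_alt locs gap
instance (locs : List Int) (gap : Int) (out : List Int) : Decidable (Spec_inset_level_maker locs gap out) := by unfold Spec_inset_level_maker; infer_instance

-- ===== CLAIM (what is proved, stated in full; the proofs are below) =====
def Claim_equal_inset_level_maker : Prop := ∀ (locs : List Int) (gap : Int), Dom_inset_level_maker locs gap → Pre_inset_level_maker locs gap → Spec_inset_level_maker locs gap (inset_level_maker locs gap)

-- ===== LEMMAS AND PROOFS =====

theorem pvAdvB_eq_pvAdvA (locs : List Int) (gap xi : Int) (j : Nat) :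
    pvAdvB locs gap xi j = pvAdvA locs gap xi j := by
  unfold pvAdvB pvAdvA
  split
  · split
    · exact pvAdvB_eq_pvAdvA locs gap xi (j + 1)
    · rfl
  · rfl
termination_by locs.length - j

-- the scan result is at least its starting counter
theorem scan_ge (t : List Int) (k : Nat) : k ≤ pvSortedScan t k := by
  induction t generalizing k with
  | nil => simp [pvSortedScan]
  | cons v rest ih =>
      unfold pvSortedScan
      split
      · exact le_trans (Nat.le_succ k) (ih (k + 1))
      · exact ih k

-- the scan advances at most once per element
theorem scan_le (t : List Int) (k : Nat) : pvSortedScan t k ≤ k + t.length := by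
  induction t generalizing k with
  | nil => simp [pvSortedScan]
  | cons v rest ih =>
      unfold pvSortedScan
      split
      · calc pvSortedScan rest (k + 1) ≤ (k + 1) + rest.length := ih (k + 1)
          _ = k + (v :: rest).length := by simp; omega
      · exact le_trans (ih k) (by simp)

-- if every element of t exceeds k, the scan stays at k
theorem scan_stay (t : List Int) (k : Nat) (h : ∀ u ∈ t, (k : Int) < u) :
    pvSortedScan t k = k := by
  induction t with
  | nil => rfl
  | cons v rest ih =>
      unfold pvSortedScan
      rw [if_neg (by have := h v (by simp); omega)]
      exact ih (fun u hu => h u (by simp [hu]))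

-- on a nondecreasing list, the scan result is not an element of the list
theorem scan_not_mem (t : List Int) (k : Nat)
    (hs : t.Pairwise (fun a b => a ≤ b)) : ((pvSortedScan t k : Nat) : Int) ∉ t := by
  induction t generalizing k with
  | nil => simp
  | cons v rest ih =>
      rcases List.pairwise_cons.mp hs with ⟨hv, hrest⟩
      unfold pvSortedScan
      split
      · rename_i hvk
        intro hmem
        rcases List.mem_cons.mp hmem with h | h
        · rw [hvk] at h
          have := scan_ge rest (k + 1); omega
        · exact ih (k + 1) hrest h
      · rename_i hvk
        intro hmem
        rcases List.mem_cons.mp hmem with h | h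
        · -- v = scan rest k; show impossible
          rcases lt_trichotomy v ((k : Int)) with hlt | heq | hgt
          · have := scan_ge rest k; omega
          · exact hvk heq
          · have hstay : pvSortedScan rest k = k :=
              scan_stay rest k (fun u hu => lt_of_lt_of_le hgt (hv u hu))
            rw [hstay] at h; omega
        · exact ih k hrest h

-- every value in [k, scan result) occurs in the list
theorem scan_mem_below (t : List Int) (k : Nat)
    (hs : t.Pairwise (fun a b => a ≤ b)) :
    ∀ m : Nat, k ≤ m → m < pvSortedScan t k → ((m : Nat) : Int) ∈ t := by
  induction t generalizing k with
  | nil => intro m h1 h2; simp [pvSortedScan] at h2; omega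
  | cons v rest ih =>
      rcases List.pairwise_cons.mp hs with ⟨hv, hrest⟩
      intro m h1 h2
      unfold pvSortedScan at h2
      split at h2
      · rename_i hvk
        by_cases hmk : m = k
        · subst hmk; simp [hvk.symm]
        · exact List.mem_cons_of_mem _ (ih (k + 1) hrest m (by omega) h2)
      · rename_i hvk
        rcases lt_trichotomy v ((k : Int)) with hlt | heq | hgt
        · exact List.mem_cons_of_mem _ (ih k hrest m h1 h2)
        · exact absurd heq hvk
        · have hstay : pvSortedScan rest k = k :=
            scan_stay rest k (fun u hu => lt_of_lt_of_le hgt (hv u hu))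
          rw [hstay] at h2; omega

-- A's fuelled itertools.count loop computes the same mex as B's sorted-scan
theorem pvMexA_eq_scan (s : List Int) :
    pvMexA s 0 (s.length + 1)
      = ((pvSortedScan (PySem.List.sorted s (fun x => x) false) 0 : Nat) : Int) := by
  set t := PySem.List.sorted s (fun x => x) false with ht
  have hperm : t.Perm s := PySem.List.sorted_perm s (fun x => x) false
  have hpw : t.Pairwise (fun a b => a ≤ b) := PySem.List.sorted_pairwise s (fun x => x)
  set r := pvSortedScan t 0 with hr
  have hrle : r ≤ s.length := by
    have := scan_le t 0
    have := hperm.length_eq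
    omega
  have hnotmem : ((r : Nat) : Int) ∉ s := fun h => scan_not_mem t 0 hpw (hperm.mem_iff.mpr h)
  have hbelow : ∀ m : Nat, m < r → ((m : Nat) : Int) ∈ s := fun m hm =>
    hperm.mem_iff.mp (scan_mem_below t 0 hpw m (Nat.zero_le m) hm)
  -- now show the fuelled loop reaches r
  suffices h : ∀ fuel k : Nat, k ≤ r → r < k + fuel → pvMexA s k fuel = ((r : Nat) : Int) by
    exact h (s.length + 1) 0 (Nat.zero_le r) (by omega)
  intro fuel
  induction fuel with
  | zero => intro k h1 h2; omega
  | succ f ih =>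
      intro k h1 h2
      unfold pvMexA
      by_cases hkr : k = r
      · subst hkr
        rw [if_neg (by simpa [PySem.Set.contains, PySem.Set.mem_ofList] using hnotmem)]
      · have hklt : k < r := by omega
        rw [if_pos (by simpa [PySem.Set.contains, PySem.Set.mem_ofList] using hbelow k hklt)]
        exact ih (k + 1) (by omega) (by omega)

-- pass 1 over range m yields exactly the per-step pointers A computes, as a list with its last value
theorem starts_spec (locs : List Int) (gap : Int) (m : Nat) :
    ∃ S : List Nat, ((List.range m).foldl (fun (st : List Nat × Nat) i =>
        (st.1 ++ [pvAdvB locs gap (locs.getD i 0) st.2], pvAdvB locs gap (locs.getD i 0) st.2)) ([], 0)) = (S, S.getLastD 0)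
      ∧ S.length = m := by
  induction m with
  | zero => exact ⟨[], rfl, rfl⟩
  | succ m ih =>
      rcases ih with ⟨S, hS, hlen⟩
      refine ⟨S ++ [pvAdvB locs gap (locs.getD m 0) (S.getLastD 0)], ?_, by simp [hlen]⟩
      rw [List.range_succ, List.foldl_append, hS]
      simp

-- ===== VERDICT (by name: the statement is the Claim_ definition above) =====
theorem inset_level_maker_spec : Claim_equal_inset_level_maker := by
  intro locs gap _ _
  unfold Spec_inset_level_maker inset_level_maker inset_level_maker_alt
  simp only []
  rcases starts_spec locs gap locs.length with ⟨S, hS, hlen⟩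
  rw [show ((List.range locs.length).foldl (fun (st : List Nat × Nat) i =>
        let j := pvAdvB locs gap (locs.getD i 0) st.2
        (st.1 ++ [j], j)) ([], 0)) = (S, S.getLastD 0) from hS]
  -- joint induction over the prefix length: A's fold state = (B's levels fold, previous pointer)
  suffices h : ∀ m : Nat, m ≤ locs.length →
      ((List.range m).foldl (fun (st : List Int × Nat) i =>
        let j := pvAdvA locs gap (locs.getD i 0) st.2
        let s := PySem.List.slice st.1 (some (j : Int)) (some (i : Int))
        (st.1 ++ [pvMexA s 0 (s.length + 1)], j)) ([], 0))
      = ((List.range m).foldl (fun (levels : List Int) i =>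
          let window := PySem.List.slice levels (some ((S.getD i 0 : Nat) : Int)) (some (i : Int))
          levels ++ [((pvSortedScan (PySem.List.sorted window (fun x => x) false) 0 : Nat) : Int)]) [],
        (S.take m).getLastD 0) by
    have := h locs.length (le_refl _)
    rw [List.take_of_length_le (le_of_eq hlen)] at this
    rw [this]
  intro m hm
  induction m with
  | zero => rfl
  | succ m ih =>
      have hm' : m ≤ locs.length := by omega
      rw [List.range_succ, List.foldl_append, List.foldl_append, ih hm']
      simp only [List.foldl_cons, List.foldl_nil]
      -- the pointer A computes at step m is S[m], whose previous value is (S.take m).getLastD 0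
      have hSm : S.getD m 0 = pvAdvA locs gap (locs.getD m 0) ((S.take m).getLastD 0) := by
        -- peel pass 1 at step m
        rcases starts_spec locs gap m with ⟨S', hS', hlen'⟩
        have : ((List.range (m + 1)).foldl (fun (st : List Nat × Nat) i =>
            (st.1 ++ [pvAdvB locs gap (locs.getD i 0) st.2], pvAdvB locs gap (locs.getD i 0) st.2)) ([], 0))
            = (S' ++ [pvAdvB locs gap (locs.getD m 0) (S'.getLastD 0)],
               pvAdvB locs gap (locs.getD m 0) (S'.getLastD 0)) := by
          rw [List.range_succ, List.foldl_append, hS']; simp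
        -- S is an extension of pass 1's result at m+1, i.e. of S' ++ [adv]
        have hpref : ∀ p : Nat, m + 1 ≤ p → p ≤ locs.length →
            ∀ T : List Nat, (((List.range p).foldl (fun (st : List Nat × Nat) i =>
              (st.1 ++ [pvAdvB locs gap (locs.getD i 0) st.2], pvAdvB locs gap (locs.getD i 0) st.2)) ([], 0)) = (T, T.getLastD 0)) →
            T.getD m 0 = pvAdvB locs gap (locs.getD m 0) (S'.getLastD 0) ∧ T.take m = S' := by
          intro p
          induction p with
          | zero => omega
          | succ p ihp =>
              intro h1 h2 T hT
              by_cases hpm : p = m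
              · subst hpm
                rw [this] at hT
                have hTeq : T = S' ++ [pvAdvB locs gap (locs.getD p 0) (S'.getLastD 0)] := by
                  have := congrArg Prod.fst hT; simpa using this.symm
                subst hTeq
                constructor
                · rw [List.getD_eq_getElem?_getD]
                  rw [List.getElem?_append_right (by omega)]
                  simp [hlen']
                · rw [List.take_append_of_le_length (le_of_eq hlen'.symm)]
                  simp [hlen']
              · have h1' : m + 1 ≤ p := by omega
                rcases starts_spec locs gap p with ⟨T', hT', hlenT'⟩
                rcases ihp h1' (by omega) T' hT' with ⟨hg, ht⟩
                rw [List.range_succ, List.foldl_append, hT'] at hT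
                simp only [List.foldl_cons, List.foldl_nil] at hT
                have hTeq : T = T' ++ [pvAdvB locs gap (locs.getD p 0) (T'.getLastD 0)] := by
                  have := congrArg Prod.fst hT; simpa using this.symm
                subst hTeq
                constructor
                · rw [List.getD_eq_getElem?_getD, List.getElem?_append_left (by omega),
                      ← List.getD_eq_getElem?_getD]
                  exact hg
                · rw [List.take_append_of_le_length (by omega)]
                  exact ht
        rcases hpref locs.length (by omega) (le_refl _) S hS with ⟨hg, ht⟩
        -- (S.take m).getLastD 0 = S'.getLastD 0
        have hprev : (S.take m).getLastD 0 = S'.getLastD 0 := by rw [ht]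
        rw [hg, hprev, pvAdvB_eq_pvAdvA]
      rw [← hSm]
      have hlast : (S.take (m + 1)).getLastD 0 = S.getD m 0 := by
        have hm1 : m < S.length := by omega
        have hlt : (S.take (m + 1)).length - 1 = m := by
          simp [List.length_take]; omega
        rw [List.getLastD_eq_getLast?, List.getLast?_eq_getElem?, hlt, List.getElem?_take,
            if_pos (Nat.lt_succ_self m), List.getD_eq_getElem?_getD]
      rw [hlast, pvMexA_eq_scan]
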